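-- pv_equiv track=rewrite | github.com/ptarau/recursors | deepllm/horn_prover.py | part2list_
-- ===== SOURCE A (Python) =====
-- def part2list_(N, pss):
--     res = []
--     pl = len(pss)
--     for i in range(N):
--         for j in range(pl):
--             if i in pss[j]:
--                 res.append(j)
--     return res
-- ===== SOURCE B (Python) =====
-- def part2list_(N, pss):
--     # Invert once: bucket block indices by element, then emit in i-then-j order.
--     buckets = {}
--     for j, ps in enumerate(pss):
--         for x in set(ps):
--             buckets.setdefault(x, []).append(j)
--     out = []
--     for i in range(N):
--         out.extend(buckets.get(i, []))
--     return out
-- ===== Notes on version B (the rewrite author's own statement) =====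
-- stated objective: faster
-- what changed: Instead of scanning every block for every i in range(N) (membership test per pair), B builds a bucket dict element->sorted block indices in one pass over the blocks and then just concatenates buckets.get(i,[]) for i in range(N).
import Mathlib
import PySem

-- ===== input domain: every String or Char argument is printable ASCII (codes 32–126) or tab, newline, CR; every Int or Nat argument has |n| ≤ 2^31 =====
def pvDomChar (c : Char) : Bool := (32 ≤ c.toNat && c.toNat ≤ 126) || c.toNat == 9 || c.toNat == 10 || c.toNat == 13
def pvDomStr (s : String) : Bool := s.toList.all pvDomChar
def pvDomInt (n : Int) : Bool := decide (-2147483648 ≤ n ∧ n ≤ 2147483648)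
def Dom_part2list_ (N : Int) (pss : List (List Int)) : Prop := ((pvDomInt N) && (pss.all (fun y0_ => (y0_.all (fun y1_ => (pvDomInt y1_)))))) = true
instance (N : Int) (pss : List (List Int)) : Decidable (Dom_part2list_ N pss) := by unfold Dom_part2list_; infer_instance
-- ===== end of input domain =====

-- B replaces A's per-i scan over all blocks by a one-pass inversion into element→block-index buckets (objective: faster).

-- ===== PORT A =====
def part2list_ (N : Int) (pss : List (List Int)) : List Int :=
  let pl : Int := pss.length
  (PySem.List.pyRange 0 N 1).foldl (fun res i =>
    (PySem.List.pyRange 0 pl 1).foldl (fun res j =>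
      if i ∈ PySem.List.pyGetD pss j [] then res ++ [j] else res) res) []

-- ===== PORT B =====
-- buckets.setdefault(x, []).append(j) is ported as Dict.modify x [] (· ++ [j]) (same effect on the stored list)
def part2list__alt (N : Int) (pss : List (List Int)) : List Int :=
  let buckets : PySem.Dict Int (List Int) :=
    (PySem.List.enumerate pss).foldl (fun d p =>
      (PySem.Set.ofList p.2).foldl (fun d x => d.modify x [] (· ++ [p.1])) d)
      PySem.Dict.empty
  (PySem.List.pyRange 0 N 1).foldl (fun out i => out ++ buckets.getD i []) []

-- ===== PRECONDITION & SPEC =====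
def Spec_part2list_ (N : Int) (pss : List (List Int)) (out : List Int) : Prop := out = part2list__alt N pss
instance (N : Int) (pss : List (List Int)) (out : List Int) : Decidable (Spec_part2list_ N pss out) := by unfold Spec_part2list_; infer_instance

-- ===== CLAIM (what is proved, stated in full; the proofs are below) =====
def Claim_equal_part2list_ : Prop := ∀ (N : Int) (pss : List (List Int)), Dom_part2list_ N pss → Spec_part2list_ N pss (part2list_ N pss)

-- ===== LEMMAS AND PROOFS =====

theorem filter_beq_of_nodup (i : Int) (l : List Int) (h : l.Nodup) :
    l.filter (· == i) = if i ∈ l then [i] else [] := by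
  induction l with
  | nil => simp
  | cons a l ih =>
      rcases List.nodup_cons.mp h with ⟨ha, hl⟩
      by_cases hai : a = i
      · subst hai
        have : l.filter (· == a) = [] := by
          apply List.filter_eq_nil_iff.mpr
          intro x hx
          simp only [beq_iff_eq]
          exact fun he => ha (he ▸ hx)
        simp [this]
      · have hb : (a == i) = false := by simp [hai]
        simp [hb, ih hl, Ne.symm hai]

theorem enumerate_append (xs ys : List (List Int)) (s : Int) :
    PySem.List.enumerate (xs ++ ys) s
      = PySem.List.enumerate xs s ++ PySem.List.enumerate ys (s + xs.length) := by
  induction xs generalizing s with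
  | nil => simp [PySem.List.enumerate_nil]
  | cons a xs ih =>
      simp [PySem.List.enumerate_cons, ih (s + 1)]
      ring_nf

-- A's inner scan (as a filter of the index range) equals B's bucket content for element i
theorem core (i : Int) (pss : List (List Int)) :
    (PySem.List.pyRange 0 (pss.length : Int) 1).filter
        (fun j => decide (i ∈ PySem.List.pyGetD pss j []))
      = (((PySem.List.enumerate pss).flatMap
            (fun p => (PySem.Set.ofList p.2).map (fun x => (x, p.1)))).filter
            (fun q => q.1 == i)).map (·.2) := by
  induction pss using List.reverseRecOn with
  | nil => simp [PySem.List.pyRange_one_eq_nil (le_refl 0), PySem.List.enumerate_nil]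
  | append_singleton xs ps ih =>
      have hlen : ((xs ++ [ps]).length : Int) = (xs.length : Int) + 1 := by simp
      rw [hlen, PySem.List.pyRange_one_succ_right (by positivity)]
      rw [List.filter_append]
      have hfl : (PySem.List.pyRange 0 (xs.length : Int) 1).filter
            (fun j => decide (i ∈ PySem.List.pyGetD (xs ++ [ps]) j []))
          = (PySem.List.pyRange 0 (xs.length : Int) 1).filter
            (fun j => decide (i ∈ PySem.List.pyGetD xs j [])) := by
        apply List.filter_congr
        intro j hj
        rcases PySem.List.mem_pyRange_one.mp hj with ⟨h0, hlt⟩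
        obtain ⟨n, rfl⟩ := Int.eq_ofNat_of_zero_le h0
        have hn : n < xs.length := by exact_mod_cast hlt
        simp [PySem.List.pyGetD_natCast, List.getD, hn, List.getElem?_append_left hn]
      rw [hfl, ih]
      have hone : [(xs.length : Int)].filter
            (fun j => decide (i ∈ PySem.List.pyGetD (xs ++ [ps]) j []))
          = if i ∈ ps then [(xs.length : Int)] else [] := by
        have : PySem.List.pyGetD (xs ++ [ps]) (xs.length : Int) [] = ps := by
          simp [PySem.List.pyGetD_natCast, List.getD]
        simp only [List.filter_cons, List.filter_nil, this]
        by_cases h : i ∈ ps <;> simp [h]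
      rw [hone]
      rw [enumerate_append, List.flatMap_append, List.filter_append, List.map_append]
      congr 1
      simp only [PySem.List.enumerate_cons, PySem.List.enumerate_nil, List.flatMap_cons,
        List.flatMap_nil, List.append_nil, List.filter_map]
      have hset : ((PySem.Set.ofList ps).filter (fun x => x == i)) = if i ∈ ps then [i] else [] := by
        rw [filter_beq_of_nodup i _ (PySem.Set.nodup_ofList ps)]
        simp [PySem.Set.mem_ofList]
      simp only [Function.comp_def]
      rw [hset]
      by_cases h : i ∈ ps <;> simp [h]

-- ===== VERDICT (by name: the statement is the Claim_ definition above) =====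
theorem part2list__spec : Claim_equal_part2list_ := by
  intro N pss _
  unfold Spec_part2list_ part2list_ part2list__alt
  dsimp only
  congr 1
  funext res i
  have hb : ((PySem.List.enumerate pss).foldl (fun d p =>
      (PySem.Set.ofList p.2).foldl (fun d x => d.modify x [] (· ++ [p.1])) d)
      PySem.Dict.empty).getD i []
      = (((PySem.List.enumerate pss).flatMap
            (fun p => (PySem.Set.ofList p.2).map (fun x => (x, p.1)))).filter
            (fun q => q.1 == i)).map (·.2) := by
    have h1 : ∀ (d : PySem.Dict Int (List Int)) (p : Int × List Int),
        (PySem.Set.ofList p.2).foldl (fun d x => d.modify x [] (· ++ [p.1])) d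
        = ((PySem.Set.ofList p.2).map (fun x => (x, p.1))).foldl
            (fun d q => d.modify q.1 [] (· ++ [q.2])) d := by
      intro d p; rw [List.foldl_map]
    simp only [h1, ← List.foldl_flatMap]
    rw [PySem.Dict.getD_foldl_modify_append]
    simp [PySem.Dict.getD_empty]
  rw [hb, ← core]
  have := PySem.List.foldl_append_if (fun j => decide (i ∈ PySem.List.pyGetD pss j []))
      (fun j => j) (PySem.List.pyRange 0 (pss.length : Int) 1) res
  simpa using this
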